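-- pv_equiv track=rewrite | github.com/JakubFlash/Advent2023 | d13_mirrors.py | list_col_discrepancies
-- ===== SOURCE A (Python) =====
-- def list_col_discrepancies(in_list: str) -> list[int]:
--     discrepancy_cts = []
--     # for each gap, note the discrepancy count
--     # smudges are in rows/columns with a total discrepancy count of 1
--
--     for gap_no in range(len(in_list)-1):
--         discrepancy_counter = 0
--         # verify refleciton around gap number gap_no
--         l_layers = gap_no + 1
--         r_layers = len(in_list) - (gap_no + 1)
--         layers_to_check = min(l_layers, r_layers)
--         for i in range(layers_to_check):
--             if in_list[gap_no - i] != in_list[gap_no + 1 + i]: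
--                 discrepancy_counter += 1
--         discrepancy_cts.append(discrepancy_counter)
--
--     return discrepancy_cts
-- ===== SOURCE B (Python) =====
-- def list_col_discrepancies(in_list: str) -> list[int]:
--     n = len(in_list)
--     discrepancy_cts = [0] * (n - 1)
--     # scatter every mirrored pair (j, k) with odd index-sum into its gap bucket
--     for j in range(n):
--         for k in range(j + 1, n):
--             if (j + k) % 2 == 1 and in_list[j] != in_list[k]:
--                 discrepancy_cts[(j + k - 1) // 2] += 1
--     return discrepancy_cts
-- ===== Notes on version B (the rewrite author's own statement) =====
-- stated objective: alternative
-- what changed: Instead of scanning outward layer-by-layer around each gap, B pre-sizes a zero bucket per gap and makes one pass over all index pairs (j,k) with odd j+k, scattering each mismatched mirrored pair into its gap bucket (j+k-1)//2.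
import Mathlib
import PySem

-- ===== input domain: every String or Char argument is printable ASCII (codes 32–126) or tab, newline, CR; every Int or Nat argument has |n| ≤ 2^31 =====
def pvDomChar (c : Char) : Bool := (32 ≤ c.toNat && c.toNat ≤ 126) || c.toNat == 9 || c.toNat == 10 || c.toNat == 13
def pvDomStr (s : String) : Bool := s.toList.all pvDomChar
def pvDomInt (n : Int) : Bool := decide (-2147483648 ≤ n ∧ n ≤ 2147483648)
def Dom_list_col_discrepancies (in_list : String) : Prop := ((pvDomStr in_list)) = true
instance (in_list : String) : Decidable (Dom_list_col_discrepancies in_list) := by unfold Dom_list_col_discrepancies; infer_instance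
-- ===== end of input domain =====

-- B replaces A's outward layer-by-layer scan around each gap by one pass over all index
-- pairs (j,k) with odd j+k, scattering each mismatched mirrored pair into a pre-sized
-- per-gap bucket (j+k-1)/2 (objective: alternative decomposition, same cost).

-- ===== PORT A =====
def list_col_discrepancies (in_list : String) : List Int :=
  let s := in_list.toList
  (List.range (s.length - 1)).foldl (fun discrepancy_cts gap_no =>
    let l_layers := gap_no + 1
    let r_layers := s.length - (gap_no + 1)
    let layers_to_check := min l_layers r_layers
    let discrepancy_counter : Int :=
      (List.range layers_to_check).foldl (fun c i =>
        if s.getD (gap_no - i) ' ' ≠ s.getD (gap_no + 1 + i) ' ' then c + 1 else c) 0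
    discrepancy_cts ++ [discrepancy_counter]) []

-- ===== PORT B =====
def list_col_discrepancies_alt (in_list : String) : List Int :=
  let s := in_list.toList
  let n := s.length
  (List.range n).foldl (fun cts j =>
    (List.range' (j + 1) (n - (j + 1))).foldl (fun cts k =>
      if (j + k) % 2 = 1 ∧ s.getD j ' ' ≠ s.getD k ' ' then
        cts.set ((j + k - 1) / 2) (cts.getD ((j + k - 1) / 2) 0 + 1)
      else cts) cts)
    (List.replicate (n - 1) (0 : Int))

-- ===== PRECONDITION & SPEC =====
def Spec_list_col_discrepancies (in_list : String) (out : List Int) : Prop := out = list_col_discrepancies_alt in_list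
instance (in_list : String) (out : List Int) : Decidable (Spec_list_col_discrepancies in_list out) := by unfold Spec_list_col_discrepancies; infer_instance

-- ===== CLAIM (what is proved, stated in full; the proofs are below) =====
def Claim_equal_list_col_discrepancies : Prop := ∀ (in_list : String), Dom_list_col_discrepancies in_list → Spec_list_col_discrepancies in_list (list_col_discrepancies in_list)

-- ===== LEMMAS AND PROOFS =====

-- the mismatch test between positions a and b of the character list
def pvMis (s : List Char) (a b : Nat) : Bool := decide (s.getD a ' ' ≠ s.getD b ' ')

-- A's inner loop is a count
lemma pv_foldl_count (p : Nat → Prop) [DecidablePred p] (l : List Nat) (c : Int) :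
    l.foldl (fun c i => if p i then c + 1 else c) c = c + (l.countP (fun i => decide (p i)) : Int) := by
  induction l generalizing c with
  | nil => simp
  | cons a t ih =>
    simp only [List.foldl_cons, List.countP_cons, ih]
    by_cases h : p a <;> simp [h]; ring

-- A's outer append loop builds a map
lemma pv_foldl_append_map (f : Nat → Int) (l : List Nat) (acc : List Int) :
    l.foldl (fun acc g => acc ++ [f g]) acc = acc ++ l.map f := by
  induction l generalizing acc with
  | nil => simp
  | cons a t ih => simp [ih]

-- the scatter step: B's loop body
def pvBump (P : Nat → Prop) [DecidablePred P] (tgt : Nat → Nat) (c : List Int) (k : Nat) : List Int :=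
  if P k then c.set (tgt k) (c.getD (tgt k) 0 + 1) else c

lemma pv_scatter_length (P : Nat → Prop) [DecidablePred P] (tgt : Nat → Nat)
    (l : List Nat) (cts : List Int) :
    (l.foldl (pvBump P tgt) cts).length = cts.length := by
  induction l generalizing cts with
  | nil => rfl
  | cons a t ih =>
    simp only [List.foldl_cons]
    rw [ih]
    unfold pvBump; split <;> simp

lemma pv_scatter_getD (P : Nat → Prop) [DecidablePred P] (tgt : Nat → Nat) (l : List Nat)
    (cts : List Int) (g : Nat) (hg : g < cts.length) :
    (l.foldl (pvBump P tgt) cts).getD g 0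
      = cts.getD g 0 + (l.countP (fun k => decide (P k) && decide (tgt k = g)) : Int) := by
  induction l generalizing cts with
  | nil => simp
  | cons a t ih =>
    simp only [List.foldl_cons, List.countP_cons]
    by_cases hp : P a
    · have hb : pvBump P tgt cts a = cts.set (tgt a) (cts.getD (tgt a) 0 + 1) := by
        unfold pvBump; rw [if_pos hp]
      rw [hb, ih _ (by simp; omega)]
      by_cases ht : tgt a = g
      · subst ht
        have : (cts.set (tgt a) (cts.getD (tgt a) 0 + 1)).getD (tgt a) 0
            = cts.getD (tgt a) 0 + 1 := by
          simp [List.getD_eq_getElem?_getD, hg]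
        rw [this]
        simp [hp]
        ring
      · have : (cts.set (tgt a) (cts.getD (tgt a) 0 + 1)).getD g 0 = cts.getD g 0 := by
          simp [List.getD_eq_getElem?_getD, List.getElem?_set_ne ht]
        rw [this]
        simp [hp, ht]
    · have hb : pvBump P tgt cts a = cts := by unfold pvBump; rw [if_neg hp]
      rw [hb, ih _ hg]
      simp [hp]

-- countP over range' of a predicate pinning the element to a single value c
lemma pv_countP_range'_eq (q : Nat → Bool) (c : Nat) (m : Nat) : ∀ (s : Nat),
    (List.range' s m).countP (fun k => decide (k = c) && q k)
      = if s ≤ c ∧ c < s + m ∧ q c = true then 1 else 0 := by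
  induction m with
  | zero => intro s; rw [if_neg (by omega)]; simp
  | succ m ih =>
    intro s
    rw [List.range'_succ, List.countP_cons, ih (s + 1)]
    by_cases hc : s = c
    · subst hc
      by_cases hq : q s = true
      · have h1 : ¬(s + 1 ≤ s ∧ s < s + 1 + m ∧ q s = true) := by omega
        rw [if_neg h1, if_pos (show s ≤ s ∧ s < s + (m + 1) ∧ q s = true from ⟨le_rfl, by omega, hq⟩)]
        simp [hq]
      · simp [hq]
    · have heq : (s + 1 ≤ c ∧ c < s + 1 + m ∧ q c = true) = (s ≤ c ∧ c < s + (m + 1) ∧ q c = true) := by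
        apply propext
        constructor <;> rintro ⟨h1, h2, h3⟩ <;> exact ⟨by omega, by omega, h3⟩
      simp only [heq]
      simp [hc]

-- a 0/1 sum is a count
lemma pv_sum_ite (p : Nat → Prop) [DecidablePred p] (l : List Nat) :
    (l.map (fun a => if p a then (1 : Nat) else 0)).sum = l.countP (fun a => decide (p a)) := by
  induction l with
  | nil => rfl
  | cons a t ih =>
    simp only [List.map_cons, List.sum_cons, List.countP_cons, ih]
    by_cases h : p a <;> simp [h]; omega

-- the nested scatter fold, bucket by bucket
lemma pv_outer (inner : Nat → List Nat) (P : Nat → Nat → Prop) [∀ j, DecidablePred (P j)]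
    (tgt : Nat → Nat → Nat) (l : List Nat) (cts : List Int) (g : Nat) (hg : g < cts.length) :
    (l.foldl (fun cts j => (inner j).foldl (pvBump (P j) (tgt j)) cts) cts).getD g 0
      = cts.getD g 0
        + ((l.map (fun j => (inner j).countP (fun k => decide (P j k) && decide (tgt j k = g)))).sum : Int) := by
  induction l generalizing cts with
  | nil => simp
  | cons a t ih =>
    simp only [List.foldl_cons, List.map_cons, List.sum_cons]
    rw [ih _ (by rw [pv_scatter_length]; omega), pv_scatter_getD _ _ _ _ _ hg]
    push_cast; ring

lemma pv_outer_length (inner : Nat → List Nat) (P : Nat → Nat → Prop) [∀ j, DecidablePred (P j)]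
    (tgt : Nat → Nat → Nat) (l : List Nat) (cts : List Int) :
    (l.foldl (fun cts j => (inner j).foldl (pvBump (P j) (tgt j)) cts) cts).length
      = cts.length := by
  induction l generalizing cts with
  | nil => rfl
  | cons a t ih => simp only [List.foldl_cons]; rw [ih, pv_scatter_length]

-- bridge: a countP over List.range is a Finset card
lemma pv_countP_card (n : Nat) (p : Nat → Bool) :
    (List.range n).countP p = ((Finset.range n).filter (fun x => p x = true)).card := by
  simp [Finset.card, Finset.filter, Finset.range, Multiset.range, List.countP_eq_length_filter]

-- the per-gap counts agree: A's layer scan vs B's pair condition, via the bijection i ↦ g - i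
lemma pv_counts_agree (s : List Char) (g : Nat) :
    (List.range (min (g + 1) (s.length - (g + 1)))).countP
        (fun i => pvMis s (g - i) (g + 1 + i))
      = (List.range s.length).countP
        (fun j => decide (j + 1 ≤ 2 * g + 1 - j ∧ 2 * g + 1 - j < s.length
            ∧ pvMis s j (2 * g + 1 - j) = true)) := by
  rw [pv_countP_card, pv_countP_card]
  have hfB : (Finset.range s.length).filter
        (fun x => decide (x + 1 ≤ 2 * g + 1 - x ∧ 2 * g + 1 - x < s.length
            ∧ pvMis s x (2 * g + 1 - x) = true) = true)
      = (Finset.range s.length).filter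
        (fun x => x + 1 ≤ 2 * g + 1 - x ∧ 2 * g + 1 - x < s.length
            ∧ pvMis s x (2 * g + 1 - x) = true) := by
    apply Finset.filter_congr
    intro x _
    simp
  rw [hfB]
  refine Finset.card_nbij' (fun i => g - i) (fun j => g - j) ?_ ?_ ?_ ?_
  · intro i hi
    simp only [Finset.coe_filter, Finset.mem_range, Set.mem_setOf_eq] at hi ⊢
    obtain ⟨hilt, hmis⟩ := hi
    have h1 : 2 * g + 1 - (g - i) = g + 1 + i := by omega
    refine ⟨by omega, by omega, by omega, ?_⟩
    rw [h1]; exact hmis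
  · intro j hj
    simp only [Finset.coe_filter, Finset.mem_range, Set.mem_setOf_eq] at hj ⊢
    obtain ⟨hjn, h1, h2, hmis⟩ := hj
    have e1 : g - (g - j) = j := by omega
    have e2 : g + 1 + (g - j) = 2 * g + 1 - j := by omega
    refine ⟨by omega, ?_⟩
    rw [e1, e2]; exact hmis
  · intro i hi
    simp only [Finset.coe_filter, Finset.mem_range, Set.mem_setOf_eq] at hi
    simp only []
    omega
  · intro j hj
    simp only [Finset.coe_filter, Finset.mem_range, Set.mem_setOf_eq] at hj
    simp only []
    omega

-- ===== VERDICT =====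
theorem list_col_discrepancies_spec : Claim_equal_list_col_discrepancies := by
  intro in_list _
  unfold Spec_list_col_discrepancies
  show list_col_discrepancies in_list = list_col_discrepancies_alt in_list
  have hA : list_col_discrepancies in_list
      = (List.range (in_list.toList.length - 1)).map (fun g =>
          ((List.range (min (g + 1) (in_list.toList.length - (g + 1)))).countP
            (fun i => pvMis in_list.toList (g - i) (g + 1 + i)) : Int)) := by
    unfold list_col_discrepancies
    rw [pv_foldl_append_map]
    simp only [List.nil_append]
    apply List.map_congr_left
    intro g _
    rw [pv_foldl_count (fun i => in_list.toList.getD (g - i) ' ' ≠ in_list.toList.getD (g + 1 + i) ' ')]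
    simp [pvMis]
  have hB : list_col_discrepancies_alt in_list
      = (List.range in_list.toList.length).foldl (fun cts j =>
          (List.range' (j + 1) (in_list.toList.length - (j + 1))).foldl
            (pvBump (fun k => (j + k) % 2 = 1 ∧ in_list.toList.getD j ' ' ≠ in_list.toList.getD k ' ')
              (fun k => (j + k - 1) / 2)) cts)
          (List.replicate (in_list.toList.length - 1) (0 : Int)) := rfl
  rw [hA, hB]
  set s := in_list.toList with hs
  apply List.ext_getElem
  · rw [pv_outer_length]
    simp
  · intro g h1 h2
    have hg : g < s.length - 1 := by simpa using h1
    have hgr : g < (List.replicate (s.length - 1) (0 : Int)).length := by simpa using hg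
    have hval := pv_outer
      (fun j => List.range' (j + 1) (s.length - (j + 1)))
      (fun j k => (j + k) % 2 = 1 ∧ s.getD j ' ' ≠ s.getD k ' ')
      (fun j k => (j + k - 1) / 2)
      (List.range s.length) (List.replicate (s.length - 1) (0 : Int)) g hgr
    rw [← List.getD_eq_getElem _ 0 h2, hval]
    beta_reduce
    simp only [List.getElem_map, List.getElem_range]
    have hsum : (List.range s.length).map (fun j =>
          (List.range' (j + 1) (s.length - (j + 1))).countP
            (fun k => decide ((j + k) % 2 = 1 ∧ s.getD j ' ' ≠ s.getD k ' ')
              && decide ((j + k - 1) / 2 = g)))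
        = (List.range s.length).map (fun j =>
            if j + 1 ≤ 2 * g + 1 - j ∧ 2 * g + 1 - j < s.length
                ∧ pvMis s j (2 * g + 1 - j) = true then 1 else 0) := by
      apply List.map_congr_left
      intro j hj
      rw [List.mem_range] at hj
      have hcong : ∀ k ∈ List.range' (j + 1) (s.length - (j + 1)),
          ((decide ((j + k) % 2 = 1 ∧ s.getD j ' ' ≠ s.getD k ' ')
              && decide ((j + k - 1) / 2 = g)) = true)
            ↔ ((decide (k = 2 * g + 1 - j) && pvMis s j k) = true) := by
        intro k hk
        have hk1 : j + 1 ≤ k := by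
          have := List.mem_range'_1.mp hk
          omega
        simp only [pvMis, Bool.and_eq_true, decide_eq_true_eq]
        constructor
        · rintro ⟨⟨h1, hm⟩, h2⟩; exact ⟨by omega, hm⟩
        · rintro ⟨hE, hm⟩; exact ⟨⟨by omega, hm⟩, by omega⟩
      rw [List.countP_congr hcong, pv_countP_range'_eq (pvMis s j) (2 * g + 1 - j) _ (j + 1)]
      have hn : j + 1 + (s.length - (j + 1)) = s.length := by omega
      rw [hn]
    rw [hsum, pv_sum_ite (fun j => j + 1 ≤ 2 * g + 1 - j ∧ 2 * g + 1 - j < s.length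
        ∧ pvMis s j (2 * g + 1 - j) = true), ← pv_counts_agree]
    simp
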